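-- pv_equiv track=rewrite | github.com/frenzyivy/CRM-of-Outreaching-Prospecting | integrations/esp/instantly.py | _extract_country_from_domain
-- ===== SOURCE A (Python) =====
-- def _extract_country_from_domain(domain: str) -> str | None:
--     """Try to guess country from TLD as a fallback."""
--     if not domain:
--         return None
--     tld_map = {
--         ".ae": "UAE", ".sa": "Saudi Arabia", ".in": "India", ".uk": "UK",
--         ".us": "USA", ".ca": "Canada", ".au": "Australia", ".de": "Germany",
--         ".fr": "France", ".sg": "Singapore", ".my": "Malaysia", ".pk": "Pakistan",
--         ".eg": "Egypt", ".qa": "Qatar", ".kw": "Kuwait", ".bh": "Bahrain",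
--         ".om": "Oman", ".jo": "Jordan", ".lb": "Lebanon", ".ng": "Nigeria",
--         ".za": "South Africa", ".ke": "Kenya", ".ph": "Philippines",
--         ".br": "Brazil", ".mx": "Mexico", ".jp": "Japan", ".kr": "South Korea",
--         ".cn": "China", ".it": "Italy", ".es": "Spain", ".nl": "Netherlands",
--         ".se": "Sweden", ".no": "Norway", ".dk": "Denmark", ".fi": "Finland",
--         ".pl": "Poland", ".si": "Slovenia", ".hr": "Croatia", ".at": "Austria",
--         ".ch": "Switzerland", ".be": "Belgium", ".pt": "Portugal", ".cz": "Czech Republic",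
--     }
--     for tld, country in tld_map.items():
--         if domain.endswith(tld):
--             return country
--     return None
-- ===== SOURCE B (Python) =====
-- def _extract_country_from_domain(domain: str) -> str | None:
--     """Try to guess country from TLD as a fallback."""
--     if not domain:
--         return None
--     codes = ("ae sa in uk us ca au de fr sg my pk eg qa kw bh om jo lb ng "
--              "za ke ph br mx jp kr cn it es nl se no dk fi pl si hr at ch be pt cz").split()
--     countries = ("UAE|Saudi Arabia|India|UK|USA|Canada|Australia|Germany|France|Singapore|"
--                  "Malaysia|Pakistan|Egypt|Qatar|Kuwait|Bahrain|Oman|Jordan|Lebanon|Nigeria|"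
--                  "South Africa|Kenya|Philippines|Brazil|Mexico|Japan|South Korea|China|Italy|"
--                  "Spain|Netherlands|Sweden|Norway|Denmark|Finland|Poland|Slovenia|Croatia|"
--                  "Austria|Switzerland|Belgium|Portugal|Czech Republic").split("|")
--     cc_map = dict(zip(codes, countries))
--     i = domain.rfind(".")
--     if i == -1:
--         return None
--     return cc_map.get(domain[i + 1:])
-- ===== Notes on version B (the rewrite author's own statement) =====
-- stated objective: alternative
-- what changed: Instead of scanning all 43 dotted TLD keys with endswith, B computes the text after the last dot (rfind + slice) and does one lookup in a code->country dict built by zipping two compact table strings; correct because every key of A is exactly one final dot-segment.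
import Mathlib
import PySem

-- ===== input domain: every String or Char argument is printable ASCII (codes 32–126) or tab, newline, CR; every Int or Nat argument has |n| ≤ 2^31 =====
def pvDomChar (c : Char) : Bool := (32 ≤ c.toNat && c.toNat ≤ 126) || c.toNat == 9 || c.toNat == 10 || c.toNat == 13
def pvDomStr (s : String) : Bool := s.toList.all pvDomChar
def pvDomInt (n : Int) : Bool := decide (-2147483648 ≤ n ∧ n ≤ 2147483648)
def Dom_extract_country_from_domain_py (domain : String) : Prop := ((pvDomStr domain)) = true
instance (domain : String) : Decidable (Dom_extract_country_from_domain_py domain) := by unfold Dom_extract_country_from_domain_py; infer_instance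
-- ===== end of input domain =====

-- B replaces A's linear endswith-scan over 43 dotted TLD keys by computing the text after the
-- last dot (rfind + slice) and looking it up once in a dict keyed by the bare two-letter code
-- (objective: simpler).

-- ===== PORT A =====
-- A's dict literal, dotted keys
def pvTldMap : PySem.Dict String String := ⟨[
  (".ae", "UAE"), (".sa", "Saudi Arabia"), (".in", "India"), (".uk", "UK"),
  (".us", "USA"), (".ca", "Canada"), (".au", "Australia"), (".de", "Germany"),
  (".fr", "France"), (".sg", "Singapore"), (".my", "Malaysia"), (".pk", "Pakistan"),
  (".eg", "Egypt"), (".qa", "Qatar"), (".kw", "Kuwait"), (".bh", "Bahrain"),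
  (".om", "Oman"), (".jo", "Jordan"), (".lb", "Lebanon"), (".ng", "Nigeria"),
  (".za", "South Africa"), (".ke", "Kenya"), (".ph", "Philippines"),
  (".br", "Brazil"), (".mx", "Mexico"), (".jp", "Japan"), (".kr", "South Korea"),
  (".cn", "China"), (".it", "Italy"), (".es", "Spain"), (".nl", "Netherlands"),
  (".se", "Sweden"), (".no", "Norway"), (".dk", "Denmark"), (".fi", "Finland"),
  (".pl", "Poland"), (".si", "Slovenia"), (".hr", "Croatia"), (".at", "Austria"),
  (".ch", "Switzerland"), (".be", "Belgium"), (".pt", "Portugal"), (".cz", "Czech Republic")]⟩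

-- A's 'for tld, country in tld_map.items(): if domain.endswith(tld): return country'
def pvScanTlds (domain : String) : List (String × String) → Option String
  | [] => none
  | (tld, country) :: rest =>
      if PySem.Str.endswith domain tld then some country else pvScanTlds domain rest

def extract_country_from_domain_py (domain : String) : Option String :=
  if PySem.Str.len domain = 0 then none
  else pvScanTlds domain pvTldMap.items

-- ===== PORT B =====
-- B's dict: dict(zip(codes, countries)) from two compact table strings
def pvCcCodes : List String := PySem.Str.split₀
  "ae sa in uk us ca au de fr sg my pk eg qa kw bh om jo lb ng za ke ph br mx jp kr cn it es nl se no dk fi pl si hr at ch be pt cz"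

def pvCountries : List String := (PySem.Str.split?
  "UAE|Saudi Arabia|India|UK|USA|Canada|Australia|Germany|France|Singapore|Malaysia|Pakistan|Egypt|Qatar|Kuwait|Bahrain|Oman|Jordan|Lebanon|Nigeria|South Africa|Kenya|Philippines|Brazil|Mexico|Japan|South Korea|China|Italy|Spain|Netherlands|Sweden|Norway|Denmark|Finland|Poland|Slovenia|Croatia|Austria|Switzerland|Belgium|Portugal|Czech Republic"
  "|").getD []

def pvCcMap : PySem.Dict String String := ⟨List.zip pvCcCodes pvCountries⟩

def extract_country_from_domain_py_alt (domain : String) : Option String :=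
  if PySem.Str.len domain = 0 then none
  else
    let i := PySem.Str.rfind domain "."
    if i = -1 then none
    else PySem.Dict.get? pvCcMap (PySem.Str.slice domain (some (i + 1)) none)

-- ===== PRECONDITION & SPEC =====
def Spec_extract_country_from_domain_py (domain : String) (out : Option String) : Prop := out = extract_country_from_domain_py_alt domain
instance (domain : String) (out : Option String) : Decidable (Spec_extract_country_from_domain_py domain out) := by unfold Spec_extract_country_from_domain_py; infer_instance

-- ===== CLAIM (what is proved, stated in full; the proofs are below) =====
def Claim_equal_extract_country_from_domain_py : Prop := ∀ (domain : String), Dom_extract_country_from_domain_py domain → Spec_extract_country_from_domain_py domain (extract_country_from_domain_py domain)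

-- ===== LEMMAS AND PROOFS =====

-- every key of A's table is a dot followed by a dot-free tail
lemma pvKeyShape : ∀ p ∈ pvTldMap.items,
    (p.1).toList.head? = some '.' ∧ '.' ∉ (p.1).toList.tail := by decide

-- the two tables are aligned: same values, A's key = '.' prepended to B's key
set_option maxRecDepth 8192 in
lemma pvAligned : List.Forall₂
    (fun p q => (p.1 : String).toList = '.' :: (q.1 : String).toList ∧ p.2 = q.2)
    pvTldMap.items pvCcMap.items := by decide

lemma pvOnePrefix (cs : List Char) (m : Nat) :
    List.isPrefixOf ['.'] (cs.drop m) = true ↔ cs[m]? = some '.' := by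
  rw [← List.head?_drop]
  cases hd : cs.drop m with
  | nil => simp [List.isPrefixOf]
  | cons a t =>
      show ('.' == a && List.isPrefixOf [] t) = true ↔ _
      rw [show List.isPrefixOf ([] : List Char) t = true from rfl]
      simp
      exact eq_comm

-- rfind.go: either no dot up to j, or the largest dot index ≤ j
lemma pvGoSpec (cs : List Char) (j : Nat) :
    (PySem.Chars.rfind.go cs ['.'] j = -1 ∧ ∀ i ≤ j, cs[i]? ≠ some '.')
    ∨ (∃ n : Nat, n ≤ j ∧ PySem.Chars.rfind.go cs ['.'] j = (n : Int) ∧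
        cs[n]? = some '.' ∧ ∀ m, n < m → m ≤ j → cs[m]? ≠ some '.') := by
  have hgo0 : PySem.Chars.rfind.go cs ['.'] 0 = if List.isPrefixOf ['.'] cs then 0 else -1 := by
    rw [PySem.Chars.rfind.go]
  have hdrop0 : List.isPrefixOf ['.'] cs = true ↔ cs[0]? = some '.' := by
    have := pvOnePrefix cs 0
    rwa [List.drop_zero] at this
  induction j with
  | zero =>
      by_cases h : cs[0]? = some '.'
      · refine Or.inr ⟨0, le_refl 0, ?_, h,
          fun m hm hm' => absurd (Nat.lt_of_lt_of_le hm hm') (lt_irrefl 0)⟩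
        rw [hgo0, if_pos (hdrop0.mpr h)]; simp
      · refine Or.inl ⟨?_, ?_⟩
        · rw [hgo0, if_neg (fun hp => h (hdrop0.mp hp))]
        · intro i hi; interval_cases i; exact h
  | succ j ih =>
      have hgo : PySem.Chars.rfind.go cs ['.'] (j+1)
          = if List.isPrefixOf ['.'] (cs.drop (j+1)) then ((j : Int)+1) else PySem.Chars.rfind.go cs ['.'] j := by
        rw [PySem.Chars.rfind.go]; push_cast; rfl
      by_cases h : cs[j+1]? = some '.'
      · refine Or.inr ⟨j+1, le_refl _, ?_, h, fun m hm hm' => absurd (Nat.lt_of_lt_of_le hm hm') (lt_irrefl _)⟩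
        rw [hgo, if_pos ((pvOnePrefix cs (j+1)).mpr h)]; push_cast; ring
      · have hgo' : PySem.Chars.rfind.go cs ['.'] (j+1) = PySem.Chars.rfind.go cs ['.'] j := by
          rw [hgo, if_neg]; intro hp; exact h ((pvOnePrefix cs (j+1)).mp hp)
        rcases ih with ⟨h1, h2⟩ | ⟨n, hn, hval, hdot, hlast⟩
        · refine Or.inl ⟨by rw [hgo']; exact h1, ?_⟩
          intro i hi
          by_cases hij : i ≤ j
          · exact h2 i hij
          · have : i = j + 1 := by omega
            rw [this]; exact h
        · refine Or.inr ⟨n, Nat.le_succ_of_le hn, by rw [hgo']; exact hval, hdot, ?_⟩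
          intro m hm hm'
          by_cases hmj : m ≤ j
          · exact hlast m hm hmj
          · have : m = j + 1 := by omega
            rw [this]; exact h

-- a key '.'::u with dot-free u is a suffix iff it IS the from-the-last-dot suffix
lemma pvEndsIff (cs u : List Char) (n : Nat)
    (hn : cs[n]? = some '.') (hlast : ∀ m, n < m → cs[m]? ≠ some '.') (hu : '.' ∉ u) :
    ('.' :: u <:+ cs) ↔ ('.' :: u = cs.drop n) := by
  constructor
  · rintro ⟨p, hp⟩
    have hdotp : cs[p.length]? = some '.' := by
      rw [← hp, List.getElem?_append_right (le_refl p.length)]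
      simp
    have h1 : p.length ≤ n := by
      by_contra hc
      exact hlast p.length (Nat.lt_of_not_le hc) hdotp
    have h2 : n ≤ p.length := by
      by_contra hc
      have hlt : p.length < n := Nat.lt_of_not_le hc
      have hnl : n < cs.length := by
        rcases List.getElem?_eq_some_iff.mp hn with ⟨hh, _⟩
        exact hh
      have : cs[n]? = ('.' :: u)[n - p.length]? := by
        rw [← hp, List.getElem?_append_right (Nat.le_of_lt hlt)]
      rw [this] at hn
      have hpos : 1 ≤ n - p.length := by omega
      have : ('.' :: u)[n - p.length]? = u[n - p.length - 1]? := by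
        rcases Nat.exists_eq_add_of_le hpos with ⟨k, hk⟩
        rw [hk]; simp [Nat.add_comm]
      rw [this] at hn
      exact hu (List.mem_of_getElem? hn)
    have hpn : n = p.length := le_antisymm h2 h1
    rw [hpn, ← hp, List.drop_left]
  · intro h; rw [h]; exact List.drop_suffix n cs

-- A's scan returns none when the string has no dot at all
lemma pvScanNone (domain : String) (L : List (String × String))
    (hL : ∀ p ∈ L, (p.1).toList.head? = some '.' ∧ '.' ∉ (p.1).toList.tail)
    (hnd : ∀ m : Nat, domain.toList[m]? ≠ some '.') :
    pvScanTlds domain L = none := by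
  induction L with
  | nil => rfl
  | cons kc rest ih =>
      obtain ⟨k, c⟩ := kc
      have hk := hL (k, c) (List.mem_cons_self)
      have hfalse : PySem.Str.endswith domain k = false := by
        by_contra hb
        have ht : PySem.Str.endswith domain k = true := by
          cases hx : PySem.Str.endswith domain k
          · exact absurd hx hb
          · rfl
        have hsuf : k.toList <:+ domain.toList := by
          have := (PySem.Chars.endswith_iff domain.toList k.toList).mp (by simpa [PySem.Str.endswith] using ht)
          exact this
        rcases hsuf with ⟨p, hp⟩
        have hcons : '.' :: k.toList.tail = k.toList := List.cons_head?_tail hk.1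
        have : domain.toList[p.length]? = some '.' := by
          rw [← hp, List.getElem?_append_right (le_refl p.length), ← hcons]
          simp
        exact hnd p.length this
      simp only [pvScanTlds, hfalse, Bool.false_eq_true, if_false]
      exact ih (fun p hp => hL p (List.mem_cons_of_mem _ hp))

-- A's scan equals first-match association lookup of the from-the-last-dot suffix
lemma pvScanGet (domain : String) (L : List (String × String)) (S : String)
    (hL : ∀ p ∈ L, (p.1).toList.head? = some '.' ∧ '.' ∉ (p.1).toList.tail)
    (n : Nat) (hn : domain.toList[n]? = some '.')
    (hlast : ∀ m, n < m → domain.toList[m]? ≠ some '.')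
    (hS : S.toList = domain.toList.drop n) :
    pvScanTlds domain L = Option.map (fun x => x.2) (List.find? (fun p => p.1 == S) L) := by
  induction L with
  | nil => rfl
  | cons kc rest ih =>
      obtain ⟨k, c⟩ := kc
      have hk := hL (k, c) (List.mem_cons_self)
      have hcons : '.' :: k.toList.tail = k.toList := List.cons_head?_tail hk.1
      have hiff : PySem.Str.endswith domain k = true ↔ k = S := by
        rw [show PySem.Str.endswith domain k = PySem.Chars.endswith domain.toList k.toList from rfl,
            PySem.Chars.endswith_iff, ← hcons]
        rw [pvEndsIff domain.toList k.toList.tail n hn hlast hk.2]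
        constructor
        · intro h
          exact String.toList_inj.mp (by rw [← hcons, h, hS])
        · intro h
          rw [← hS, ← h]
          exact hcons
      by_cases he : PySem.Str.endswith domain k = true
      · have hkS : k = S := hiff.mp he
        simp only [pvScanTlds, he, if_true, List.find?]
        rw [show (k == S) = true from beq_iff_eq.mpr hkS]
        rfl
      · have hkS : ¬ k = S := fun h => he (hiff.mpr h)
        have he' : PySem.Str.endswith domain k = false := by
          cases hx : PySem.Str.endswith domain k
          · rfl
          · exact absurd hx he
        simp only [pvScanTlds, he', Bool.false_eq_true, if_false, List.find?]
        rw [show (k == S) = false from beq_eq_false_iff_ne.mpr hkS]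
        exact ih (fun p hp => hL p (List.mem_cons_of_mem _ hp))

-- first-match lookup of '.'++cc in the dotted table = lookup of cc in the aligned dotless table
lemma pvFindPair (L1 L2 : List (String × String)) (S S' : String)
    (hSS : S.toList = '.' :: S'.toList)
    (h : List.Forall₂ (fun p q => (p.1 : String).toList = '.' :: (q.1 : String).toList ∧ p.2 = q.2) L1 L2) :
    Option.map (fun x => x.2) (L1.find? (fun p => p.1 == S))
      = Option.map (fun x => x.2) (L2.find? (fun p => p.1 == S')) := by
  induction h with
  | nil => rfl
  | @cons a b l1 l2 hpq htail ih =>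
      obtain ⟨h1, h2⟩ := hpq
      have hkey : (a.1 == S) = (b.1 == S') := by
        by_cases hb : b.1 = S'
        · have : a.1 = S := String.toList_inj.mp (by rw [h1, hb, hSS])
          rw [beq_iff_eq.mpr hb, beq_iff_eq.mpr this]
        · have : ¬ a.1 = S := by
            intro ha
            apply hb
            apply String.toList_inj.mp
            have hc := congrArg String.toList ha
            rw [h1, hSS] at hc
            exact (List.cons.injEq _ _ _ _ ▸ hc : _ ∧ _).2
          rw [beq_eq_false_iff_ne.mpr hb, beq_eq_false_iff_ne.mpr this]
      simp only [List.find?, hkey]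
      cases hx : (b.1 == S') with
      | true => simp [h2]
      | false => exact ih

-- ===== VERDICT (by name: the statement is the Claim_ definition above) =====
theorem extract_country_from_domain_py_spec : Claim_equal_extract_country_from_domain_py := by
  intro domain _
  unfold Spec_extract_country_from_domain_py extract_country_from_domain_py extract_country_from_domain_py_alt
  by_cases hlen : PySem.Str.len domain = 0
  · rw [if_pos hlen, if_pos hlen]
  · rw [if_neg hlen, if_neg hlen]
    have hrfind : PySem.Str.rfind domain "." = PySem.Chars.rfind.go domain.toList ['.'] domain.toList.length := rfl
    rcases pvGoSpec domain.toList domain.toList.length with ⟨h1, h2⟩ | ⟨n, hn, hval, hdot, hlast⟩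
    · rw [pvScanNone domain pvTldMap.items pvKeyShape ?_]
      · rw [if_pos (by rw [hrfind, h1])]
      · intro m
        by_cases hm : m ≤ domain.toList.length
        · exact h2 m hm
        · rw [List.getElem?_eq_none (by omega)]; simp
    · have hlast' : ∀ m, n < m → domain.toList[m]? ≠ some '.' := by
        intro m hm
        by_cases hmk : m ≤ domain.toList.length
        · exact hlast m hm hmk
        · rw [List.getElem?_eq_none (by omega)]; simp
      have hne : ¬ (PySem.Str.rfind domain "." = -1) := by
        rw [hrfind, hval]; omega
      rw [if_neg hne]
      -- B's slice key: text after the last dot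
      have hslice : (PySem.Str.slice domain (some (PySem.Str.rfind domain "." + 1)) none).toList
          = domain.toList.drop (n + 1) := by
        rw [hrfind, hval]
        simp only [PySem.Str.slice, PySem.Chars.slice_eq_listSlice]
        have ht : ((n : Int) + 1).toNat = n + 1 := by omega
        rw [PySem.List.slice_from (ha := by omega), ht]
        simp
      have hnl : n < domain.toList.length := (List.getElem?_eq_some_iff.mp hdot).1
      have hdropn : domain.toList.drop n = '.' :: domain.toList.drop (n + 1) := by
        rw [List.drop_eq_getElem_cons hnl]
        congr 1
        exact Option.some_injective _ (by rw [← hdot, List.getElem?_eq_getElem hnl])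
      have hA := pvScanGet domain pvTldMap.items (String.ofList (domain.toList.drop n))
        pvKeyShape n hdot hlast' (by simp)
      rw [hA]
      exact pvFindPair pvTldMap.items pvCcMap.items _ _
        (by rw [hslice]; simpa using hdropn) pvAligned
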